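-- pv_equiv track=rewrite | github.com/avasileios/Advent-of-Code-Solutions | 2015/Day-11-Challenge/day11p1.py | check_increasing_straight
-- ===== SOURCE A (Python) =====
-- def check_increasing_straight(password: str) -> bool:
--     """
--     Rule 1: Must include one increasing straight of at least three letters (abc, bcd, etc.).
--     """
--     N = len(password)
--     if N < 3:
--         return False
--
--     for i in range(N - 2):
--         c1 = ord(password[i])
--         c2 = ord(password[i+1])
--         c3 = ord(password[i+2])
--
--         # Check if c1 + 1 = c2 AND c2 + 1 = c3
--         if c2 == c1 + 1 and c3 == c2 + 1:
--             return True
--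
--     return False
-- ===== SOURCE B (Python) =====
-- def check_increasing_straight(password: str) -> bool:
--     run = 1
--     for i in range(1, len(password)):
--         if ord(password[i]) == ord(password[i - 1]) + 1:
--             run += 1
--             if run >= 3:
--                 return True
--         else:
--             run = 1
--     return False
-- ===== Notes on version B (the rewrite author's own statement) =====
-- stated objective: alternative
-- what changed: Replaces the independent three-character window test at each index by a single pass carrying a run-length counter of consecutive increasing letters that resets on a break and succeeds when it reaches 3.
import Mathlib
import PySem

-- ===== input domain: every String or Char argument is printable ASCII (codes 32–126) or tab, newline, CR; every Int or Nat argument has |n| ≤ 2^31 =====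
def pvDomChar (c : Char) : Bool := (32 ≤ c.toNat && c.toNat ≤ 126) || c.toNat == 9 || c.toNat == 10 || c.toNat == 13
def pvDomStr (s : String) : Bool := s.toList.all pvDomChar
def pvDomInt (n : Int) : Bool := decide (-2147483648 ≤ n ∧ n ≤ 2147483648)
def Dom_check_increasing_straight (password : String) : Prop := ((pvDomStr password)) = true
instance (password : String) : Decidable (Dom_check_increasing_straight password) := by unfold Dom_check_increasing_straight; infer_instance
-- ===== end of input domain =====

-- B carries a run-length counter reset on breaks instead of testing an independent 3-window at each index (objective: alternative).

-- ===== PORT A =====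
-- A's loop over i in range(N-2) reading password[i..i+2] is the sliding 3-window scan:
-- structural recursion over the character list, keeping the window's three characters.
def pvAScan : List Char → Bool
  | a :: b :: c :: rest =>
      if b.toNat = a.toNat + 1 ∧ c.toNat = b.toNat + 1 then true
      else pvAScan (b :: c :: rest)
  | _ => false

def check_increasing_straight (password : String) : Bool :=
  let N : Int := (password.toList.length : Int)
  if N < 3 then false
  else pvAScan password.toList

-- ===== PORT B =====
-- run starts at 1; each character is compared with the previous one, incrementing or resetting run.
def pvBScan : Char → Int → List Char → Bool
  | _, _, [] => false
  | prev, run, c :: rest =>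
      if c.toNat = prev.toNat + 1 then
        if run + 1 ≥ 3 then true else pvBScan c (run + 1) rest
      else pvBScan c 1 rest

def check_increasing_straight_alt (password : String) : Bool :=
  match password.toList with
  | [] => false
  | c :: rest => pvBScan c 1 rest

-- ===== PRECONDITION & SPEC =====
def Spec_check_increasing_straight (password : String) (out : Bool) : Prop := out = check_increasing_straight_alt password
instance (password : String) (out : Bool) : Decidable (Spec_check_increasing_straight password out) := by unfold Spec_check_increasing_straight; infer_instance

-- ===== CLAIM (what is proved, stated in full; the proofs are below) =====
def Claim_equal_check_increasing_straight : Prop := ∀ (password : String), Dom_check_increasing_straight password → Spec_check_increasing_straight password (check_increasing_straight password)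

-- ===== LEMMAS AND PROOFS =====

-- Joint invariant: with run = 1, B's scan from `a` equals A's window scan on a :: l;
-- with run = 2 (prev pair a,b already increasing), it equals A's scan on a :: b :: l.
theorem pvScan_agree (l : List Char) :
    (∀ a, pvBScan a 1 l = pvAScan (a :: l)) ∧
    (∀ a b, b.toNat = a.toNat + 1 → pvBScan b 2 l = pvAScan (a :: b :: l)) := by
  induction l with
  | nil => constructor <;> intros <;> simp [pvBScan, pvAScan]
  | cons c rest ih =>
    obtain ⟨ih1, ih2⟩ := ih
    constructor
    · intro a
      by_cases h : c.toNat = a.toNat + 1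
      · have : pvBScan a 1 (c :: rest) = pvBScan c 2 rest := by
          simp [pvBScan, h]
        rw [this, ih2 a c h]
      · have hB : pvBScan a 1 (c :: rest) = pvBScan c 1 rest := by
          simp [pvBScan, h]
        rw [hB, ih1 c]
        cases rest with
        | nil => simp [pvAScan]
        | cons d r => simp [pvAScan, h]
    · intro a b hab
      by_cases h : c.toNat = b.toNat + 1
      · simp [pvBScan, pvAScan, h, hab]
      · have hB : pvBScan b 2 (c :: rest) = pvBScan c 1 rest := by
          simp [pvBScan, h]
        rw [hB, ih1 c]
        have hA : pvAScan (a :: b :: c :: rest) = pvAScan (b :: c :: rest) := by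
          simp [pvAScan, h]
        rw [hA]
        cases rest with
        | nil => simp [pvAScan]
        | cons d r => simp [pvAScan, h]

-- A's N < 3 guard is redundant: the window scan itself returns false on short lists.
theorem pvAScan_short (l : List Char) (h : l.length < 3) : pvAScan l = false := by
  match l, h with
  | [], _ => simp [pvAScan]
  | [a], _ => simp [pvAScan]
  | [a, b], _ => simp [pvAScan]
  | a :: b :: c :: r, h => simp at h; omega

-- ===== VERDICT (by name: the statement is the Claim_ definition above) =====
theorem check_increasing_straight_spec : Claim_equal_check_increasing_straight := by
  intro password _
  unfold Spec_check_increasing_straight check_increasing_straight check_increasing_straight_alt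
  cases hl : password.toList with
  | nil => simp
  | cons c rest =>
    show (if ((c :: rest).length : Int) < 3 then false else pvAScan (c :: rest))
        = pvBScan c 1 rest
    rw [(pvScan_agree rest).1 c]
    split
    · next h =>
      refine (pvAScan_short _ ?_).symm
      simp at h ⊢; omega
    · rfl
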